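-- pv_equiv track=rewrite | github.com/chrislevn/Coding-Challenges | Blue/Google_1.py | solution
-- ===== SOURCE A (Python) =====
-- def solution(string):
--     res = 1
--     for i in range(len(string)):
--         length = int(len(string) / (i+1))
--         flag = True
--         for j in range(len(string)):
--             if string[j] != string[j % length]:
--                 flag = False
--                 break
--         if flag:
--             res += 1
--     return res
-- ===== SOURCE B (Python) =====
-- def solution(string):
--     n = len(string)
--     lengths = {n // (i + 1) for i in range(n)}
--     valid = {L for L in lengths if string[L:] == string[:n - L]}
--     return 1 + sum(1 for i in range(n) if n // (i + 1) in valid)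
-- ===== Notes on version B (the rewrite author's own statement) =====
-- stated objective: faster
-- what changed: B replaces A's per-i O(n) modular-index scan by computing the set of distinct candidate periods (at most ~2*sqrt(n)) and testing each once via the shift characterisation string[L:] == string[:n-L], then counting i with n//(i+1) in that valid set.
import Mathlib
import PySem

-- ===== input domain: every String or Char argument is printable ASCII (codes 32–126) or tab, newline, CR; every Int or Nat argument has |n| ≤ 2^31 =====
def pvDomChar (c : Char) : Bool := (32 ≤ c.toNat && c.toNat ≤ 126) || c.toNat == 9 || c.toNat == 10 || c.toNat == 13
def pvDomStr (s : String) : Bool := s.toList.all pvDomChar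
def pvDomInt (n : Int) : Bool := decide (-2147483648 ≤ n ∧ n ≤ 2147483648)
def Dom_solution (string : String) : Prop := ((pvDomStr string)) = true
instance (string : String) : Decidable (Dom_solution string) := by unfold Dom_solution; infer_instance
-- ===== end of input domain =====

-- B is faster: it tests each distinct candidate period once (shift comparison) instead of A's per-i modular scan.

-- ===== PORT A =====
-- inner 'for j in range(len(string))' loop with its break: returns the final flag
def solInner (s : List Char) (length : Int) : List Int → Bool
  | [] => true
  | j :: rest =>
      if PySem.List.pyGet? s j ≠ PySem.List.pyGet? s (PySem.Int.mod j length) then false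
      else solInner s length rest

-- int(len(string)/(i+1)) is ported as floor division: exact here since both operands are
-- nonnegative and far below 2^53 (float true division is exact enough, int() truncates = floors).
def solution (string : String) : Int :=
  let s := string.toList
  let n : Int := (s.length : Int)
  (PySem.List.pyRange 0 n 1).foldl (fun res i =>
      let length := PySem.Int.floordiv n (i + 1)
      let flag := solInner s length (PySem.List.pyRange 0 n 1)
      if flag then res + 1 else res) 1

-- ===== PORT B =====
def solution_alt (string : String) : Int :=
  let s := string.toList
  let n : Int := (s.length : Int)
  let lengths : PySem.Set Int :=
    PySem.Set.ofList ((PySem.List.pyRange 0 n 1).map (fun i => PySem.Int.floordiv n (i + 1)))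
  let valid : PySem.Set Int :=
    lengths.filter (fun L =>
      PySem.List.slice s (some L) none = PySem.List.slice s none (some (n - L)))
  1 + ((PySem.List.pyRange 0 n 1).map (fun i =>
      if PySem.Set.contains valid (PySem.Int.floordiv n (i + 1)) then (1 : Int) else 0)).sum

-- ===== PRECONDITION & SPEC =====
def Spec_solution (string : String) (out : Int) : Prop := out = solution_alt string
instance (string : String) (out : Int) : Decidable (Spec_solution string out) := by unfold Spec_solution; infer_instance

-- ===== CLAIM (what is proved, stated in full; the proofs are below) =====
def Claim_equal_solution : Prop := ∀ (string : String), Dom_solution string → Spec_solution string (solution string)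

-- ===== LEMMAS AND PROOFS =====

theorem solInner_eq_all (s : List Char) (L : Int) (js : List Int) :
    solInner s L js =
      js.all (fun j => PySem.List.pyGet? s j == PySem.List.pyGet? s (PySem.Int.mod j L)) := by
  induction js with
  | nil => rfl
  | cons j rest ih =>
      simp only [solInner, List.all_cons, ih]
      by_cases h : PySem.List.pyGet? s j = PySem.List.pyGet? s (PySem.Int.mod j L) <;> simp [h]

-- the shift characterisation of periodicity: s[j] = s[j % L] for all j  ↔  s.drop L = s.take (n - L)
theorem periodic_iff_shift (s : List Char) (L : Nat) (hL : 1 ≤ L) :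
    (∀ k < s.length, s[k]? = s[k % L]?) ↔ s.drop L = s.take (s.length - L) := by
  constructor
  · intro h
    apply List.ext_getElem?
    intro k
    rcases lt_or_ge k (s.length - L) with hk | hk
    · have h1 : (s.drop L)[k]? = s[L + k]? := by
        rw [List.getElem?_drop]
      have h2 : (s.take (s.length - L))[k]? = s[k]? := by
        rw [List.getElem?_take_of_lt hk]
      rw [h1, h2]
      have e1 := h (L + k) (by omega)
      have e2 := h k (by omega)
      have : (L + k) % L = k % L := Nat.add_mod_left L k
      rw [e1, e2, this]
    · rw [List.getElem?_drop]
      have : s[L + k]? = none := by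
        apply List.getElem?_eq_none
        omega
      rw [this]
      symm
      apply List.getElem?_eq_none
      simp [List.length_take]
      omega
  · intro h k
    induction k using Nat.strong_induction_on with
    | _ k ih =>
      intro hk
      rcases lt_or_ge k L with hkL | hkL
      · rw [Nat.mod_eq_of_lt hkL]
      · -- k = L + (k - L), use drop/take equality at index k - L
        have hkl : k - L < s.length - L := by omega
        have e : s[k]? = s[k - L]? := by
          have h1 : (s.drop L)[k - L]? = s[L + (k - L)]? := by rw [List.getElem?_drop]
          have h2 : (s.take (s.length - L))[k - L]? = s[k - L]? := by
            rw [List.getElem?_take_of_lt hkl]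
          have : L + (k - L) = k := by omega
          rw [this] at h1
          rw [← h1, h, h2]
        have mod_eq : k % L = (k - L) % L := by
          conv_lhs => rw [← Nat.sub_add_cancel hkL]
          rw [Nat.add_mod_right]
        rw [e, mod_eq]
        exact ih (k - L) (by omega) (by omega)

-- 'all j in range(n)' as the universally quantified statement
theorem all_pyRange_iff (s : List Char) (L n : Nat) :
    ((PySem.List.pyRange 0 (n : Int) 1).all
        (fun j => PySem.List.pyGet? s j == PySem.List.pyGet? s (PySem.Int.mod j (L : Int))) = true)
      ↔ (∀ k < n, PySem.List.pyGet? s (k : Int) = PySem.List.pyGet? s (PySem.Int.mod (k : Int) (L : Int))) := by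
  rw [List.all_eq_true]
  constructor
  · intro h k hk
    have : (k : Int) ∈ PySem.List.pyRange 0 (n : Int) 1 := by
      rw [PySem.List.mem_pyRange_one]; omega
    simpa using h _ this
  · intro h j hj
    rw [PySem.List.mem_pyRange_one] at hj
    have hj0 : 0 ≤ j := hj.1
    have : j = ((j.toNat : Nat) : Int) := by omega
    rw [this]
    simpa using h j.toNat (by omega)

theorem set_contains_filter (xs : List Int) (p : Int → Bool) (v : Int) :
    PySem.Set.contains ((PySem.Set.ofList xs).filter p) v = (decide (v ∈ xs) && p v) := by
  simp [PySem.Set.contains, List.mem_filter, PySem.Set.mem_ofList]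

theorem countP_eq_aux (s : List Char) :
    ∀ i ∈ PySem.List.pyRange 0 (s.length : Int) 1,
      solInner s (PySem.Int.floordiv (s.length : Int) (i + 1)) (PySem.List.pyRange 0 (s.length : Int) 1)
      = PySem.Set.contains
          ((PySem.Set.ofList ((PySem.List.pyRange 0 (s.length : Int) 1).map
              (fun i => PySem.Int.floordiv (s.length : Int) (i + 1)))).filter
            (fun L => decide (PySem.List.slice s (some L) none
                    = PySem.List.slice s none (some ((s.length : Int) - L)))))
          (PySem.Int.floordiv (s.length : Int) (i + 1)) := by
  intro i hi
  have hminfo := (PySem.List.mem_pyRange_one).mp hi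
  obtain ⟨hi0, hin⟩ := hminfo
  set n := s.length with hn
  have hik : i = ((i.toNat : Nat) : Int) := by omega
  set k := i.toNat with hk
  have hkn : k < n := by omega
  have hdiv : PySem.Int.floordiv (n : Int) (i + 1) = ((n / (k + 1) : Nat) : Int) := by
    rw [hik]
    have : ((k : Nat) : Int) + 1 = ((k + 1 : Nat) : Int) := by push_cast; ring
    rw [this, PySem.Int.floordiv_natCast]
  set L := n / (k + 1) with hL
  have hL1 : 1 ≤ L := by
    have : k + 1 ≤ n := hkn
    exact (Nat.one_le_div_iff (by omega)).mpr this
  have hLn : L ≤ n := Nat.div_le_self n (k + 1)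
  -- LHS as a decide of the shift equation
  have lhs_eq : solInner s (PySem.Int.floordiv (n : Int) (i + 1)) (PySem.List.pyRange 0 (n : Int) 1)
      = decide (s.drop L = s.take (n - L)) := by
    rw [hdiv, solInner_eq_all]
    apply Bool.eq_iff_iff.mpr
    simp only [decide_eq_true_eq]
    rw [all_pyRange_iff, hn, ← periodic_iff_shift s L hL1]
    apply forall_congr'
    intro m
    apply imp_congr_right
    intro _
    simp only [PySem.Int.mod_natCast, PySem.List.pyGet?_natCast]
  -- RHS
  have hmem : PySem.Int.floordiv (n : Int) (i + 1)
      ∈ (PySem.List.pyRange 0 (n : Int) 1).map (fun i => PySem.Int.floordiv (n : Int) (i + 1)) :=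
    List.mem_map.mpr ⟨i, hi, rfl⟩
  have hsub : ((n : Int) - ((L : Nat) : Int)) = (((n - L : Nat) : Nat) : Int) := by
    omega
  have hslice : (PySem.List.slice s (some ((L : Nat) : Int)) none
        = PySem.List.slice s none (some ((n : Int) - ((L : Nat) : Int))))
      ↔ (s.drop L = s.take (n - L)) := by
    rw [PySem.List.slice_from_natCast, hsub, PySem.List.slice_to_natCast]
  rw [lhs_eq]
  rw [hdiv] at hmem ⊢
  rw [set_contains_filter, decide_eq_true hmem, Bool.true_and]
  exact decide_eq_decide.mpr hslice.symm

theorem solution_spec : Claim_equal_solution := by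
  intro string _
  show solution string = solution_alt string
  simp only [solution, solution_alt]
  rw [PySem.List.foldl_if_add_one, PySem.List.sum_map_ite_one_zero]
  congr 1
  norm_cast
  apply List.countP_congr
  intro i hi
  simp only [countP_eq_aux string.toList i hi]
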